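-- pv_equiv track=rewrite | github.com/Skinla/project | tms/server.py | find_selected_mapping_row
-- ===== SOURCE A (Python) =====
-- def find_selected_mapping_row(entity_rows, slug):
--     if slug:
--         for row in entity_rows:
--             cloud_slugs = {item.get("slug") for item in row.get("cloudItems", [])}
--             box_slugs = {item.get("slug") for item in row.get("boxItems", [])}
--             if slug in cloud_slugs or slug in box_slugs:
--                 return row
--
--     for row in entity_rows:
--         if row.get("cloudItems") or row.get("boxItems"):
--             return row
--     return None
-- ===== SOURCE B (Python) =====
-- def find_selected_mapping_row(entity_rows, slug):
--     fallback = None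
--     for row in entity_rows:
--         cloud = row.get("cloudItems", [])
--         box = row.get("boxItems", [])
--         if slug and any(item.get("slug") == slug for item in cloud + box):
--             return row
--         if fallback is None and (cloud or box):
--             fallback = row
--     return fallback
-- ===== Notes on version B (the rewrite author's own statement) =====
-- stated objective: alternative
-- what changed: A's two sequential passes (a slug-match scan building per-row slug sets, then a separate fallback scan for the first nonempty row) are merged into one loop that tests slug matches directly with any() and carries the first-nonempty fallback in an accumulator.
import Mathlib
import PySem

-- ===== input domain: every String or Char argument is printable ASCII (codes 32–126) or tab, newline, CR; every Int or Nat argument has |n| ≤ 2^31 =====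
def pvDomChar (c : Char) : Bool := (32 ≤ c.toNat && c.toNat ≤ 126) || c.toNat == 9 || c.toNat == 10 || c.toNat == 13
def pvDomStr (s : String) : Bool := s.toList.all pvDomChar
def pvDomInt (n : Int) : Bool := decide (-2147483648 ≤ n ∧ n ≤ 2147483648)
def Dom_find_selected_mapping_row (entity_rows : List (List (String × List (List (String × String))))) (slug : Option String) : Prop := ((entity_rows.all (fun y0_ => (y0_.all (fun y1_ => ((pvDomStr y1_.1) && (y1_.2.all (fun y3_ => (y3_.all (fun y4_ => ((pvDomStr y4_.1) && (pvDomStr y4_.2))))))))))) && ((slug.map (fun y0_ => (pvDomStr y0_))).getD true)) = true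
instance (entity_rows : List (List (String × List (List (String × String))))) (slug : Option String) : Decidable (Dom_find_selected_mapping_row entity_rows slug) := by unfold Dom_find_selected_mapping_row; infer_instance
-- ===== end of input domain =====

-- B merges A's two sequential passes into a single loop carrying a first-nonempty fallback accumulator (alternative decomposition, same cost).


abbrev pvRow : Type := List (String × List (List (String × String)))

-- ===== PORT A =====
-- {item.get("slug") for item in items}
def pvA_slugSet (items : List (List (String × String))) : PySem.Set (Option String) :=
  PySem.Set.ofList (items.map (fun item => (PySem.Dict.mk item).get? "slug"))

-- first loop of A: for row in entity_rows: … if slug in cloud_slugs or slug in box_slugs: return row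
def pvA_findSlugLoop (rows : List pvRow) (s : String) : Option pvRow :=
  match rows with
  | [] => none
  | row :: rest =>
    let cloud_slugs := pvA_slugSet ((PySem.Dict.mk row).getD "cloudItems" [])
    let box_slugs := pvA_slugSet ((PySem.Dict.mk row).getD "boxItems" [])
    if PySem.Set.contains cloud_slugs (some s) || PySem.Set.contains box_slugs (some s) then some row
    else pvA_findSlugLoop rest s

-- Python truthiness of row.get(k) (an Option of a list)
def pvTruthyOL (o : Option (List (List (String × String)))) : Bool :=
  match o with
  | none => false
  | some l => !l.isEmpty

-- second loop of A: for row in entity_rows: if row.get("cloudItems") or row.get("boxItems"): return row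
def pvA_fallbackLoop (rows : List pvRow) : Option pvRow :=
  match rows with
  | [] => none
  | row :: rest =>
    if pvTruthyOL ((PySem.Dict.mk row).get? "cloudItems") || pvTruthyOL ((PySem.Dict.mk row).get? "boxItems") then some row
    else pvA_fallbackLoop rest

def find_selected_mapping_row (entity_rows : List (List (String × List (List (String × String))))) (slug : Option String) : Option (List (String × List (List (String × String)))) :=
  let hit : Option pvRow :=
    match slug with
    | some s => if s = "" then none else pvA_findSlugLoop entity_rows s
    | none => none
  match hit with
  | some r => some r
  | none => pvA_fallbackLoop entity_rows

-- ===== PORT B =====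
-- 'slug and any(item.get("slug") == slug for item in cloud + box)'
def pvB_match (slug : Option String) (cloud box : List (List (String × String))) : Bool :=
  match slug with
  | none => false
  | some s => !(s == "") && (cloud ++ box).any (fun item => (PySem.Dict.mk item).get? "slug" == some s)

-- B's single loop with the fallback accumulator
def pvB_loop (slug : Option String) (rows : List pvRow) (fallback : Option pvRow) : Option pvRow :=
  match rows with
  | [] => fallback
  | row :: rest =>
    let cloud := (PySem.Dict.mk row).getD "cloudItems" []
    let box := (PySem.Dict.mk row).getD "boxItems" []
    if pvB_match slug cloud box then some row
    else pvB_loop slug rest (if fallback.isNone && (!cloud.isEmpty || !box.isEmpty) then some row else fallback)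

def find_selected_mapping_row_alt (entity_rows : List (List (String × List (List (String × String))))) (slug : Option String) : Option (List (String × List (List (String × String)))) :=
  pvB_loop slug entity_rows none

-- ===== PRECONDITION & SPEC =====
def Spec_find_selected_mapping_row (entity_rows : List (List (String × List (List (String × String))))) (slug : Option String) (out : Option (List (String × List (List (String × String))))) : Prop := out = find_selected_mapping_row_alt entity_rows slug
instance (entity_rows : List (List (String × List (List (String × String))))) (slug : Option String) (out : Option (List (String × List (List (String × String))))) : Decidable (Spec_find_selected_mapping_row entity_rows slug out) := by unfold Spec_find_selected_mapping_row; infer_instance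

-- ===== CLAIM (what is proved, stated in full; the proofs are below) =====
def Claim_equal_find_selected_mapping_row : Prop := ∀ (entity_rows : List (List (String × List (List (String × String))))) (slug : Option String), Dom_find_selected_mapping_row entity_rows slug → Spec_find_selected_mapping_row entity_rows slug (find_selected_mapping_row entity_rows slug)

-- ===== LEMMAS AND PROOFS =====

-- A's nonempty test on row.get(k) equals B's test on row.get(k, []).
theorem pvTruthy_eq (row : pvRow) (k : String) :
    pvTruthyOL ((PySem.Dict.mk row).get? k) = !((PySem.Dict.mk row).getD k []).isEmpty := by
  rw [PySem.Dict.getD_eq_get?_getD]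
  cases h : (PySem.Dict.mk row).get? k <;> simp [pvTruthyOL]

-- membership in the slug set equals a direct any-scan
theorem pvSet_contains_eq (items : List (List (String × String))) (s : String) :
    PySem.Set.contains (pvA_slugSet items) (some s)
      = items.any (fun item => (PySem.Dict.mk item).get? "slug" == some s) := by
  unfold pvA_slugSet
  rw [Bool.eq_iff_iff]
  simp only [PySem.Set.contains, List.elem_iff, PySem.Set.mem_ofList, List.mem_map,
    List.any_eq_true, beq_iff_eq]

-- A's slug-match condition equals B's (for truthy slug = some s, s ≠ "")
theorem pvMatch_eq (row : pvRow) (s : String) (hs : (s == "") = false) :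
    (PySem.Set.contains (pvA_slugSet ((PySem.Dict.mk row).getD "cloudItems" [])) (some s)
      || PySem.Set.contains (pvA_slugSet ((PySem.Dict.mk row).getD "boxItems" [])) (some s))
      = pvB_match (some s) ((PySem.Dict.mk row).getD "cloudItems" []) ((PySem.Dict.mk row).getD "boxItems" []) := by
  rw [pvSet_contains_eq, pvSet_contains_eq]
  simp [pvB_match, hs, List.any_append]

-- with falsy slug, B's loop returns the fallback if set, else A's fallback scan
theorem pvB_loop_falsy (slug : Option String)
    (hf : ∀ c b, pvB_match slug c b = false)
    (rows : List pvRow) (fb : Option pvRow) :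
    pvB_loop slug rows fb = (if fb.isSome then fb else pvA_fallbackLoop rows) := by
  induction rows generalizing fb with
  | nil => cases fb <;> simp [pvB_loop, pvA_fallbackLoop]
  | cons row rest ih =>
    simp only [pvB_loop, hf, if_false, Bool.false_eq_true]
    rw [ih]
    cases fb with
    | some f => simp
    | none =>
      simp only [pvA_fallbackLoop, pvTruthy_eq, Option.isNone_none, Bool.true_and]
      by_cases hc : (!((PySem.Dict.mk row).getD "cloudItems" []).isEmpty
          || !((PySem.Dict.mk row).getD "boxItems" []).isEmpty) = true
      · simp [hc]
      · simp_all

-- with truthy slug, B's loop = A's slug scan, falling back to fb / A's fallback scan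
theorem pvB_loop_truthy (s : String) (hs : (s == "") = false)
    (rows : List pvRow) (fb : Option pvRow) :
    pvB_loop (some s) rows fb
      = (match pvA_findSlugLoop rows s with
         | some r => some r
         | none => if fb.isSome then fb else pvA_fallbackLoop rows) := by
  induction rows generalizing fb with
  | nil => cases fb <;> simp [pvB_loop, pvA_findSlugLoop, pvA_fallbackLoop]
  | cons row rest ih =>
    simp only [pvB_loop, pvA_findSlugLoop]
    rw [pvMatch_eq row s hs]
    by_cases hm : pvB_match (some s) ((PySem.Dict.mk row).getD "cloudItems" []) ((PySem.Dict.mk row).getD "boxItems" []) = true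
    · simp [hm]
    · simp only [Bool.not_eq_true] at hm
      simp only [hm, if_false, Bool.false_eq_true]
      rw [ih]
      cases hfind : pvA_findSlugLoop rest s with
      | some r => simp
      | none =>
        cases fb with
        | some f => simp
        | none =>
          simp only [pvA_fallbackLoop, pvTruthy_eq, Option.isNone_none, Bool.true_and]
          by_cases hc : (!((PySem.Dict.mk row).getD "cloudItems" []).isEmpty
              || !((PySem.Dict.mk row).getD "boxItems" []).isEmpty) = true
          · simp [hc]
          · simp_all

-- ===== VERDICT (by name: the statement is the Claim_ definition above) =====
theorem find_selected_mapping_row_spec : Claim_equal_find_selected_mapping_row := by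
  intro rows slug _
  unfold Spec_find_selected_mapping_row find_selected_mapping_row find_selected_mapping_row_alt
  cases slug with
  | none =>
    dsimp only
    rw [pvB_loop_falsy none (by intro c b; rfl) rows none]
    simp
  | some s =>
    dsimp only
    by_cases hs : s = ""
    · subst hs
      rw [if_pos rfl, pvB_loop_falsy (some "") (by intro c b; simp [pvB_match]) rows none]
      simp
    · have hs' : (s == "") = false := by simp [hs]
      rw [if_neg hs, pvB_loop_truthy s hs' rows none]
      cases pvA_findSlugLoop rows s <;> simp
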